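-- pv_equiv track=rewrite | github.com/notSziVeR/client-python-files-master | root/helper.py | GetBestMatchingName
-- ===== SOURCE A (Python) =====
-- def GetBestMatchingName(name, nameList):
-- 	if len(nameList) == 0:
-- 		return ""
--
-- 	bestName = nameList[0]
-- 	bestNameLen = len(bestName)
-- 	for elem in nameList:
-- 		curLen = len(elem)
-- 		if curLen < bestNameLen:
-- 			bestName = elem
-- 			bestNameLen = curLen
-- 		elif curLen == bestNameLen:
-- 			plusPos = bestName.find("+")
-- 			plusPosCur = elem.find("+")
-- 			if plusPos > 0 and plusPosCur == plusPos and curLen > plusPosCur + 1: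
-- 				tmpBestName = bestName[:plusPos+1] + elem[plusPos+1] + bestName[plusPos+2:]
-- 				if tmpBestName == elem:
-- 					bestName = elem
-- 					bestNameLen = curLen
--
-- 	return bestName
-- ===== SOURCE B (Python) =====
-- def GetBestMatchingName(name, nameList):
--     if len(nameList) == 0:
--         return ""
--     m = min(len(e) for e in nameList)
--     best = None
--     for elem in nameList:
--         if len(elem) != m:
--             continue
--         if best is None:
--             best = elem
--         else:
--             p = best.find("+")
--             if 0 < p and p + 2 <= len(elem) and elem[:p+1] == best[:p+1] and elem[p+2:] == best[p+2:]:
--                 best = elem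
--     return best
-- ===== Notes on version B (the rewrite author's own statement) =====
-- stated objective: alternative
-- what changed: B first computes the global minimum length, then folds only over the minimum-length elements, deciding the '+'-tie-break by direct prefix/suffix comparison instead of A's running best-with-length state and temporary replacement-string construction.
import Mathlib
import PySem

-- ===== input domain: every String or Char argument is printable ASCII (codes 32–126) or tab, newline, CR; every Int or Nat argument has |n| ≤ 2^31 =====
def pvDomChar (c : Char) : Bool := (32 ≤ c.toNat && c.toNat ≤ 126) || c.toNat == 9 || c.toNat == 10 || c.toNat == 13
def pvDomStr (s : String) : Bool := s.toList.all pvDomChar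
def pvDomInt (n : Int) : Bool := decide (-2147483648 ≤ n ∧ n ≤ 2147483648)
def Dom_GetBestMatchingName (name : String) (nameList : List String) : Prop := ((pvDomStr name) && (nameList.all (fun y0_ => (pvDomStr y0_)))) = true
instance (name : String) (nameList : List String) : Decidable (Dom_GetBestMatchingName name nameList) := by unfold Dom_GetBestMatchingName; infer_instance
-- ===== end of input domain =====

-- B replaces A's one-pass running-best loop by a min-length pass plus a fold over the
-- minimum-length elements with the tie-break phrased as prefix/suffix equality (alternative
-- decomposition, same asymptotic cost).

-- ===== PORT A =====
-- one loop iteration of A; strings handled as code-point lists via PySem.Chars (exact)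
def pvStepA (st : List Char × Int) (elem : List Char) : List Char × Int :=
  let curLen := PySem.Chars.len elem
  if curLen < st.2 then (elem, curLen)
  else if curLen = st.2 then
    let plusPos := PySem.Chars.find st.1 ['+']
    let plusPosCur := PySem.Chars.find elem ['+']
    if 0 < plusPos ∧ plusPosCur = plusPos ∧ plusPosCur + 1 < curLen then
      -- elem[plusPos+1] is in range whenever this branch is reached (curLen > plusPos+1),
      -- so Option.toList of the pyGet? is exactly the one-character string Python builds
      let tmp := PySem.Chars.slice st.1 none (some (plusPos + 1)) ++
                 (PySem.Chars.pyGet? elem (plusPos + 1)).toList ++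
                 PySem.Chars.slice st.1 (some (plusPos + 2)) none
      if tmp = elem then (elem, curLen) else st
    else st
  else st

def GetBestMatchingName (name : String) (nameList : List String) : String :=
  if nameList.length = 0 then "" else
    let l := nameList.map String.toList
    let best0 := l.headD []          -- nameList[0]; the list is nonempty here
    String.ofList ((l.foldl pvStepA (best0, PySem.Chars.len best0)).1)

-- ===== PORT B =====
-- one loop iteration of B (state: Option best; skips elements whose length ≠ m)
def pvStepB (m : Int) (st : Option (List Char)) (elem : List Char) : Option (List Char) :=
  if PySem.Chars.len elem ≠ m then st
  else
    match st with
    | none => some elem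
    | some best =>
      let p := PySem.Chars.find best ['+']
      if 0 < p ∧ p + 2 ≤ PySem.Chars.len elem ∧
         PySem.Chars.slice elem none (some (p + 1)) = PySem.Chars.slice best none (some (p + 1)) ∧
         PySem.Chars.slice elem (some (p + 2)) none = PySem.Chars.slice best (some (p + 2)) none
      then some elem else some best

def GetBestMatchingName_alt (name : String) (nameList : List String) : String :=
  if nameList.length = 0 then "" else
    let l := nameList.map String.toList
    let m := (PySem.List.min? (l.map PySem.Chars.len) id).getD 0   -- min(len(e) for e in nameList); some since nonempty
    String.ofList ((l.foldl (pvStepB m) none).getD [])             -- best is never None here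

-- ===== PRECONDITION & SPEC =====
def Spec_GetBestMatchingName (name : String) (nameList : List String) (out : String) : Prop := out = GetBestMatchingName_alt name nameList
instance (name : String) (nameList : List String) (out : String) : Decidable (Spec_GetBestMatchingName name nameList out) := by unfold Spec_GetBestMatchingName; infer_instance

-- ===== CLAIM (what is proved, stated in full; the proofs are below) =====
def Claim_equal_GetBestMatchingName : Prop := ∀ (name : String) (nameList : List String), Dom_GetBestMatchingName name nameList → Spec_GetBestMatchingName name nameList (GetBestMatchingName name nameList)

-- ===== LEMMAS AND PROOFS =====

-- pure version of A's loop step (the length component is determined by the best string)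
def pvSA (b e : List Char) : List Char := (pvStepA (b, PySem.Chars.len b) e).1

-- pure tie-break step of B
def pvSB (b e : List Char) : List Char :=
  let p := PySem.Chars.find b ['+']
  if 0 < p ∧ p + 2 ≤ PySem.Chars.len e ∧
     PySem.Chars.slice e none (some (p + 1)) = PySem.Chars.slice b none (some (p + 1)) ∧
     PySem.Chars.slice e (some (p + 2)) none = PySem.Chars.slice b (some (p + 2)) none
  then e else b

theorem pvStepA_pair (b e : List Char) :
    pvStepA (b, PySem.Chars.len b) e = (pvSA b e, PySem.Chars.len (pvSA b e)) := by
  unfold pvSA pvStepA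
  dsimp only
  split_ifs <;> rfl

theorem pvSA_or (b e : List Char) : pvSA b e = b ∨ pvSA b e = e := by
  unfold pvSA pvStepA
  dsimp only
  split_ifs <;> simp

theorem pvSA_lt {b e : List Char} (h : e.length < b.length) : pvSA b e = e := by
  unfold pvSA pvStepA
  simp only [PySem.Chars.len_eq]
  rw [if_pos (by exact_mod_cast h)]

theorem pvSA_gt {b e : List Char} (h : b.length < e.length) : pvSA b e = b := by
  unfold pvSA pvStepA
  simp only [PySem.Chars.len_eq]
  rw [if_neg (by omega), if_neg (by omega)]

theorem pv_singleton_prefix {c : Char} {ys : List Char} : [c] <+: ys ↔ ys.head? = some c := by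
  cases ys <;> simp [List.cons_prefix_cons, eq_comm]

theorem pv_prefix_drop {c : Char} {l : List Char} (i : ℕ) : [c] <+: l.drop i ↔ l[i]? = some c := by
  rw [pv_singleton_prefix, List.head?_drop]

theorem pvSA_tie {b e : List Char} (h : e.length = b.length) : pvSA b e = pvSB b e := by
  unfold pvSA pvStepA pvSB
  dsimp only
  simp only [PySem.Chars.len_eq, PySem.Chars.slice_eq_listSlice, PySem.Chars.pyGet?_eq_listPyGet?, h]
  rw [if_neg (lt_irrefl _), if_pos trivial]
  by_cases hp0 : 0 < PySem.Chars.find b ['+']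
  · -- p > 0
    have hpN : PySem.Chars.find b ['+'] = ((PySem.Chars.find b ['+']).toNat : ℤ) :=
      (Int.toNat_of_nonneg hp0.le).symm
    set pN := (PySem.Chars.find b ['+']).toNat with hpNdef
    have hspec := PySem.Chars.find_spec (s := b) (sub := ['+']) hp0.le
    have hbp : b[pN]? = some '+' := (pv_prefix_drop pN).1 hspec.1
    have hpNlt : pN < b.length := (List.getElem?_eq_some_iff.mp hbp).1
    have hpNpos : 0 < pN := by omega
    have c1 : ((pN : ℤ)) + 1 = ((pN + 1 : ℕ) : ℤ) := by push_cast; ring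
    have c2 : ((pN : ℤ)) + 2 = ((pN + 2 : ℕ) : ℤ) := by push_cast; ring
    rw [hpN, c1, c2, PySem.List.slice_to_natCast, PySem.List.slice_from_natCast,
        PySem.List.slice_to_natCast, PySem.List.slice_from_natCast, PySem.List.pyGet?_natCast]
    by_cases hL : pN + 2 ≤ b.length
    · -- the interesting range
      have he1 : pN + 1 < e.length := by omega
      rw [List.getElem?_eq_getElem he1]
      -- three implications between A's guard and B's guard
      have hfwd : PySem.Chars.find e ['+'] = ((pN : ℕ) : ℤ) →
          b.take (pN + 1) ++ (some e[pN + 1]).toList ++ b.drop (pN + 2) = e →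
          e.take (pN + 1) = b.take (pN + 1) ∧ e.drop (pN + 2) = b.drop (pN + 2) := by
        intro _ htmp
        have hlt : (b.take (pN + 1)).length = pN + 1 := by
          simp [List.length_take]; omega
        constructor
        · conv_lhs => rw [← htmp]
          rw [List.append_assoc, List.take_left' hlt]
        · conv_lhs => rw [← htmp]
          have hl2 : (b.take (pN + 1) ++ (some e[pN + 1]).toList).length = pN + 2 := by
            simp [List.length_take]; omega
          rw [List.drop_left' hl2]
      have hback2 : e.take (pN + 1) = b.take (pN + 1) → e.drop (pN + 2) = b.drop (pN + 2) →
          b.take (pN + 1) ++ (some e[pN + 1]).toList ++ b.drop (pN + 2) = e := by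
        intro hpp hss
        rw [← hpp, ← hss]
        have hd : e.drop (pN + 1) = e[pN + 1] :: e.drop (pN + 2) := by
          rw [List.drop_eq_getElem_cons he1]
        conv_rhs => rw [← List.take_append_drop (pN + 1) e, hd]
        simp
      have hback1 : e.take (pN + 1) = b.take (pN + 1) → e.drop (pN + 2) = b.drop (pN + 2) →
          PySem.Chars.find e ['+'] = ((pN : ℕ) : ℤ) := by
        intro hpp _
        have hidx : ∀ i : ℕ, i < pN + 1 → e[i]? = b[i]? := by
          intro i hi
          have := congrArg (fun l => l[i]?) hpp
          simpa [List.getElem?_take, hi] using this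
        have hep : e[pN]? = some '+' := by rw [hidx pN (by omega)]; exact hbp
        have hinf : ['+'] <:+: e :=
          (((pv_prefix_drop pN).2 hep).isInfix).trans (List.drop_suffix pN e).isInfix
        have hpe0 : 0 ≤ PySem.Chars.find e ['+'] := (PySem.Chars.find_nonneg_iff e ['+']).2 hinf
        have hspecE := PySem.Chars.find_spec (s := e) (sub := ['+']) hpe0
        set qN := (PySem.Chars.find e ['+']).toNat with hqdef
        have heq : e[qN]? = some '+' := (pv_prefix_drop qN).1 hspecE.1
        have hq1 : ¬ qN < pN := by
          intro hlt
          exact hspec.2 qN hlt ((pv_prefix_drop qN).2 (by rw [← hidx qN (by omega)]; exact heq))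
        have hq2 : ¬ pN < qN := by
          intro hlt
          exact hspecE.2 pN hlt ((pv_prefix_drop pN).2 hep)
        have hqp : qN = pN := by omega
        rw [← hqp, hqdef, Int.toNat_of_nonneg hpe0]
      split_ifs with h1 h2 h3 h4 h5
      · rfl
      · exact absurd ⟨by exact_mod_cast hpNpos, by exact_mod_cast hL,
          (hfwd h1.2.1 h2).1, (hfwd h1.2.1 h2).2⟩ h3
      · exact absurd (hback2 h4.2.2.1 h4.2.2.2) h2
      · rfl
      · refine absurd ⟨by exact_mod_cast hpNpos, hback1 h5.2.2.1 h5.2.2.2, ?_⟩ h1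
        rw [hback1 h5.2.2.1 h5.2.2.2]
        omega
      · rfl
    · -- pN + 2 > b.length: both guards are false
      have hA : ¬ (0 < ((pN : ℕ) : ℤ) ∧ PySem.Chars.find e ['+'] = ((pN : ℕ) : ℤ) ∧
          PySem.Chars.find e ['+'] + 1 < ((b.length : ℕ) : ℤ)) := by
        rintro ⟨-, hpe, hlt⟩
        rw [hpe] at hlt
        omega
      have hB : ¬ (0 < ((pN : ℕ) : ℤ) ∧ (((pN + 2 : ℕ)) : ℤ) ≤ ((b.length : ℕ) : ℤ) ∧
          e.take (pN + 1) = b.take (pN + 1) ∧ e.drop (pN + 2) = b.drop (pN + 2)) := by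
        rintro ⟨-, hle, -⟩
        omega
      rw [if_neg hA, if_neg hB]
  · -- p ≤ 0: both guards are false
    rw [if_neg (by rintro ⟨h1, -⟩; exact hp0 h1), if_neg (by rintro ⟨h1, -⟩; exact hp0 h1)]

theorem pvFoldA_pair (l : List (List Char)) (b : List Char) :
    l.foldl pvStepA (b, PySem.Chars.len b) = (l.foldl pvSA b, PySem.Chars.len (l.foldl pvSA b)) := by
  induction l generalizing b with
  | nil => rfl
  | cons e t ih => simp only [List.foldl_cons, pvStepA_pair, ih]

theorem pvSA_self (b : List Char) : pvSA b b = b := by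
  rcases pvSA_or b b with h | h <;> exact h

theorem pvFoldA_gt {mN : ℕ} : ∀ (l : List (List Char)) (b : List Char), mN < b.length →
    (∀ e ∈ l, mN < e.length) → mN < (l.foldl pvSA b).length := by
  intro l
  induction l with
  | nil => intro b hb _; simpa using hb
  | cons e t ih =>
    intro b hb hall
    simp only [List.foldl_cons]
    apply ih
    · rcases pvSA_or b e with h2 | h2 <;> rw [h2]
      · exact hb
      · exact hall e (by simp)
    · intro y hy; exact hall y (by simp [hy])

theorem pvStepB_skip (m : ℤ) (st : Option (List Char)) (e : List Char)
    (h : PySem.Chars.len e ≠ m) : pvStepB m st e = st := by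
  unfold pvStepB; rw [if_pos h]

theorem pvStepB_tie (m : ℤ) (b e : List Char) (hm : PySem.Chars.len e = m) :
    pvStepB m (some b) e = some (pvSB b e) := by
  unfold pvStepB pvSB
  rw [if_neg (not_ne_iff.mpr hm)]
  dsimp only
  split_ifs <;> rfl

theorem pvFoldB_pre (m : ℤ) : ∀ (pre : List (List Char)),
    (∀ e ∈ pre, PySem.Chars.len e ≠ m) → pre.foldl (pvStepB m) none = none := by
  intro pre
  induction pre with
  | nil => intro _; rfl
  | cons e t ih =>
    intro hall
    simp only [List.foldl_cons]
    rw [pvStepB_skip m none e (hall e (by simp))]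
    exact ih (fun y hy => hall y (by simp [hy]))

theorem pvFold_post {mN : ℕ} : ∀ (post : List (List Char)) (b : List Char), b.length = mN →
    (∀ e ∈ post, mN ≤ e.length) →
    post.foldl (pvStepB (mN : ℤ)) (some b) = some (post.foldl pvSA b) := by
  intro post
  induction post with
  | nil => intro b _ _; rfl
  | cons e t ih =>
    intro b hb hall
    simp only [List.foldl_cons]
    by_cases he : e.length = mN
    · rw [pvStepB_tie _ _ _ (by simp [PySem.Chars.len_eq, he]),
         ← pvSA_tie (by rw [he, hb])]
      apply ih
      · rcases pvSA_or b e with h2 | h2 <;> rw [h2]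
        · exact hb
        · exact he
      · intro y hy; exact hall y (by simp [hy])
    · have hgt : b.length < e.length := by
        have := hall e (by simp); omega
      rw [pvStepB_skip _ _ _ (by simp [PySem.Chars.len_eq]; omega), pvSA_gt hgt]
      exact ih b hb (fun y hy => hall y (by simp [hy]))

theorem pv_dropWhile_head {α : Type} (p : α → Bool) : ∀ (l : List α) (x : α) (xs : List α),
    l.dropWhile p = x :: xs → p x = false := by
  intro l
  induction l with
  | nil => intro x xs hx; simp [List.dropWhile] at hx
  | cons a t ih =>
    intro x xs hx
    rw [List.dropWhile_cons] at hx
    split_ifs at hx with hpa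
    · exact ih x xs hx
    · cases hx; simpa using hpa

-- ===== VERDICT (by name: the statement is the Claim_ definition above) =====
theorem GetBestMatchingName_spec : Claim_equal_GetBestMatchingName := by
  intro name nameList _
  unfold Spec_GetBestMatchingName GetBestMatchingName GetBestMatchingName_alt
  by_cases hnil : nameList.length = 0
  · rw [if_pos hnil, if_pos hnil]
  · rw [if_neg hnil, if_neg hnil]
    dsimp only
    set l := nameList.map String.toList with hldef
    have hl : l ≠ [] := by
      rw [hldef]; cases nameList
      · simp at hnil
      · simp
    rw [pvFoldA_pair]
    -- the minimum length
    obtain ⟨mI, hmI⟩ : ∃ mI, PySem.List.min? (l.map PySem.Chars.len) id = some mI := by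
      cases hmm : PySem.List.min? (l.map PySem.Chars.len) id with
      | none =>
        rw [PySem.List.min?_eq_none_iff, List.map_eq_nil_iff] at hmm
        exact absurd hmm hl
      | some v => exact ⟨v, rfl⟩
    rw [hmI]
    simp only [Option.getD_some]
    obtain ⟨x0, hx0l, hx0⟩ := List.mem_map.mp (PySem.List.min?_mem hmI)
    have hmI0 : 0 ≤ mI := by rw [← hx0, PySem.Chars.len_eq]; positivity
    set mN := mI.toNat with hmNdef
    have hmIc : mI = (mN : ℤ) := (Int.toNat_of_nonneg hmI0).symm
    have hge : ∀ e ∈ l, mN ≤ e.length := by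
      intro e he
      have h2 := PySem.List.min?_isMin hmI (PySem.Chars.len e) (List.mem_map_of_mem he)
      simp only [id, PySem.Chars.len_eq] at h2
      omega
    -- split l at the first element of minimum length
    obtain ⟨x, post, hxp⟩ : ∃ x post, l.dropWhile (fun e => e.length != mN) = x :: post := by
      cases hcase : l.dropWhile (fun e => e.length != mN) with
      | nil =>
        exfalso
        rw [List.dropWhile_eq_nil_iff] at hcase
        have hx0len : x0.length = mN := by
          have := hx0; rw [PySem.Chars.len_eq, hmIc] at this; exact_mod_cast this
        have := hcase x0 hx0l
        simp [hx0len] at this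
      | cons y ys => exact ⟨y, ys, rfl⟩
    have hxlen : x.length = mN := by
      have := pv_dropWhile_head _ l x post hxp
      simpa using this
    set pre := l.takeWhile (fun e => e.length != mN) with hpredef
    have hsplit : pre ++ x :: post = l := by
      rw [hpredef, ← hxp]; exact List.takeWhile_append_dropWhile
    have hpregt : ∀ e ∈ pre, mN < e.length := by
      intro e he
      have h1 := List.mem_takeWhile_imp he
      have h2 : e ∈ l := by rw [← hsplit]; exact List.mem_append.mpr (Or.inl he)
      have h3 := hge e h2
      simp only [bne_iff_ne, ne_eq] at h1
      omega
    have hpost : ∀ e ∈ post, mN ≤ e.length := by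
      intro e he
      exact hge e (by rw [← hsplit]; simp [he])
    -- A's fold reduces to the fold over post started at x
    have hAside : l.foldl pvSA (l.headD []) = post.foldl pvSA x := by
      rw [← hsplit]
      cases hpre0 : pre with
      | nil =>
        simp only [List.nil_append, List.headD_cons, List.foldl_cons, pvSA_self]
      | cons hd pre' =>
        have hhd : (hd :: pre' ++ x :: post).headD [] = hd := rfl
        rw [hhd, List.foldl_append]
        have hc : mN < ((hd :: pre').foldl pvSA hd).length := by
          apply pvFoldA_gt
          · exact hpregt hd (by rw [hpre0]; simp)
          · intro y hy; exact hpregt y (by rw [hpre0]; exact hy)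
        rw [List.foldl_cons, pvSA_lt (by omega : x.length < ((hd :: pre').foldl pvSA hd).length)]
    -- B's fold reduces to the same fold
    have hBside : l.foldl (pvStepB mI) none = some (post.foldl pvSA x) := by
      rw [← hsplit, List.foldl_append, pvFoldB_pre mI pre (by
        intro e he
        have := hpregt e he
        rw [PySem.Chars.len_eq, hmIc]
        intro hc
        omega)]
      rw [List.foldl_cons]
      have hx1 : pvStepB mI none x = some x := by
        unfold pvStepB
        rw [if_neg (by rw [PySem.Chars.len_eq, hmIc]; intro hc; exact absurd (by exact_mod_cast hc) (by simp [hxlen]))]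
      rw [hx1, hmIc, pvFold_post post x hxlen hpost]
    rw [hAside, hBside]
    rfl
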